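-- pv_equiv track=rewrite | github.com/mara/mara-catalog | mara_catalog/export.py | clean_hadoop_path
-- ===== SOURCE A (Python) =====
-- def clean_hadoop_path(path) -> str:
--     """
--     Hadoop hides paths starting with '_' and '.'. With this function paths for tables are renamed so that they can be read via Hadoop.
--     """
--     parts = []
--     for part in str(path).split('/'):
--         if part.startswith('_') or part.startswith('.'):
--             parts.append('x' + part)
--         else:
--             parts.append(part)
--
--     return '/'.join(parts)
-- ===== SOURCE B (Python) =====
-- import re
--
--
-- def clean_hadoop_path(path) -> str:
--     """
--     Hadoop hides paths starting with '_' and '.'. With this function paths for tables are renamed so that they can be read via Hadoop.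
--     """
--     return re.sub(r'(^|/)([._])', r'\1x\2', str(path))
-- ===== Notes on version B (the rewrite author's own statement) =====
-- stated objective: idiomatic
-- what changed: Replaced the split/loop/join over path segments with a single regular-expression substitution that prepends 'x' to '_' or '.' at the start of the string or right after a '/'.
import Mathlib
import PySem

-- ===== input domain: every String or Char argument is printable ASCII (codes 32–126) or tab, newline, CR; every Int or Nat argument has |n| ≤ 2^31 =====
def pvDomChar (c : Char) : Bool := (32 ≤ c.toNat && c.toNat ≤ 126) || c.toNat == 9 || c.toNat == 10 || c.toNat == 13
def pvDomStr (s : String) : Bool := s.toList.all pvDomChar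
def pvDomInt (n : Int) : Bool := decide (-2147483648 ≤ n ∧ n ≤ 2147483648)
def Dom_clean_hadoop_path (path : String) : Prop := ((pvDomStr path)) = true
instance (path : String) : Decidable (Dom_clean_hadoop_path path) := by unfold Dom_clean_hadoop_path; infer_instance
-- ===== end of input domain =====

-- B replaces A's split/loop/join over path segments by a single regex-style left-to-right
-- substitution pass (idiomatic one-liner in Python); return values proved equal on all inputs.

-- ===== PORT A =====
-- str(path).split('/'); loop appending 'x'+part or part; '/'.join(parts)
-- (string ops ported on List Char via PySem.Chars, the exact carriers of PySem.Str.split?/join)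
def clean_hadoop_path (path : String) : String :=
  String.ofList (PySem.Chars.join ['/']
    ((PySem.Chars.splitOn path.toList ['/']).foldl
      (fun parts part =>
        if PySem.Chars.startswith part ['_'] || PySem.Chars.startswith part ['.']
        then parts ++ [['x'] ++ part]
        else parts ++ [part]) []))

-- ===== PORT B =====
-- hand-port of re.sub(r'(^|/)([._])', r'\1x\2', str(path)): a left-to-right scan; the Bool
-- state says whether the current position is the start of the string or just after '/',
-- exactly where the pattern (^|/) can match; a matched '_'/'.' gets 'x' prepended.
def pvRegexSub : Bool → List Char → List Char
  | _, [] => []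
  | atSegStart, c :: cs =>
    if atSegStart && (c == '_' || c == '.') then 'x' :: c :: pvRegexSub (c == '/') cs
    else c :: pvRegexSub (c == '/') cs

def clean_hadoop_path_alt (path : String) : String :=
  String.ofList (pvRegexSub true path.toList)

-- ===== PRECONDITION & SPEC =====
def Spec_clean_hadoop_path (path : String) (out : String) : Prop := out = clean_hadoop_path_alt path
instance (path : String) (out : String) : Decidable (Spec_clean_hadoop_path path out) := by unfold Spec_clean_hadoop_path; infer_instance

-- ===== CLAIM (what is proved, stated in full; the proofs are below) =====
def Claim_equal_clean_hadoop_path : Prop := ∀ (path : String), Dom_clean_hadoop_path path → Spec_clean_hadoop_path path (clean_hadoop_path path)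

-- ===== LEMMAS AND PROOFS =====

-- the segment-marking function A applies to each part
def pvMark (part : List Char) : List Char :=
  if PySem.Chars.startswith part ['_'] || PySem.Chars.startswith part ['.']
  then ['x'] ++ part else part

-- structural split on '/' (no fuel), to reason about PySem.Chars.splitOn
def pvSp : List Char → List (List Char)
  | [] => [[]]
  | c :: rest => if c = '/' then [] :: pvSp rest else (pvSp rest).modifyHead (c :: ·)

-- fuel-carrying invariant of PySem.Chars.splitOn.go for the single-char separator '/'
theorem pvModifyHead_id {α : Type} (l : List α) : l.modifyHead (fun x => x) = l := by
  cases l <;> simp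

theorem pvSp_ne_nil : ∀ (cs : List Char), pvSp cs ≠ []
  | [] => by simp [pvSp]
  | c :: rest => by
    by_cases hc : c = '/'
    · simp [pvSp, hc]
    · obtain ⟨h0, t0, he⟩ := List.exists_cons_of_ne_nil (pvSp_ne_nil rest)
      simp [pvSp, hc, he]

theorem pvGo_eq (l : List Char) : ∀ (fuel : Nat) (cur : List Char) (acc : List (List Char)),
    l.length ≤ fuel →
    PySem.Chars.splitOn.go ['/'] fuel l cur acc
      = acc.reverse ++ ((pvSp l).modifyHead (cur.reverse ++ ·)) := by
  induction l with
  | nil =>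
    intro fuel cur acc _
    cases fuel <;> simp [PySem.Chars.splitOn.go, pvSp]
  | cons c rest ih =>
    intro fuel cur acc h
    cases fuel with
    | zero => simp at h
    | succ f =>
      by_cases hc : c = '/'
      · have hpre : List.isPrefixOf ['/'] (c :: rest) = true := by
          simp [List.isPrefixOf, hc]
        rw [show PySem.Chars.splitOn.go ['/'] (f+1) (c :: rest) cur acc
              = PySem.Chars.splitOn.go ['/'] f rest [] (cur.reverse :: acc) by
            simp [PySem.Chars.splitOn.go, hpre]]
        rw [ih f [] (cur.reverse :: acc) (by simpa using Nat.succ_le_succ_iff.mp h)]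
        simp [pvSp, hc, pvModifyHead_id]
      · have hpre : List.isPrefixOf ['/'] (c :: rest) = false := by
          simp [List.isPrefixOf]
          intro habs
          exact absurd habs.symm hc
        rw [show PySem.Chars.splitOn.go ['/'] (f+1) (c :: rest) cur acc
              = PySem.Chars.splitOn.go ['/'] f rest (c :: cur) acc by
            simp [PySem.Chars.splitOn.go, hpre]]
        rw [ih f (c :: cur) acc (by simpa using Nat.succ_le_succ_iff.mp h)]
        obtain ⟨h0, t0, he⟩ := List.exists_cons_of_ne_nil (pvSp_ne_nil rest)
        simp [pvSp, hc, he, List.modifyHead]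

theorem pvSplitOn_eq (cs : List Char) : PySem.Chars.splitOn cs ['/'] = pvSp cs := by
  have := pvGo_eq cs (cs.length + 1) [] [] (by omega)
  simpa [PySem.Chars.splitOn, pvModifyHead_id] using this

-- the heart: A's join∘map-mark over the split equals B's single scan, in both scanner states
theorem pvMain (cs : List Char) :
    pvRegexSub true cs = PySem.Chars.join ['/'] ((pvSp cs).map pvMark) ∧
    pvRegexSub false cs
      = PySem.Chars.join ['/'] ((pvSp cs).headD [] :: ((pvSp cs).tail.map pvMark)) := by
  induction cs with
  | nil =>
    refine ⟨?_, ?_⟩ <;> simp [pvRegexSub, pvSp, PySem.Chars.join_singleton, pvMark,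
      PySem.Chars.startswith, List.isPrefixOf]
  | cons c rest ih =>
    obtain ⟨ih1, ih2⟩ := ih
    obtain ⟨h0, t0, he⟩ := List.exists_cons_of_ne_nil (pvSp_ne_nil rest)
    by_cases hc : c = '/'
    · subst hc
      have hL : ∀ b, pvRegexSub b ('/' :: rest) = '/' :: pvRegexSub true rest := by
        intro b; simp [pvRegexSub]
      have hR : PySem.Chars.join ['/'] ([] :: (pvSp rest).map pvMark)
          = '/' :: pvRegexSub true rest := by
        rw [he, List.map_cons, PySem.Chars.join_cons_cons, ih1, he, List.map_cons]
        simp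
      constructor
      · rw [hL, show pvSp ('/' :: rest) = [] :: pvSp rest by simp [pvSp], List.map_cons,
          show pvMark [] = [] by decide]
        exact hR.symm
      · rw [hL, show pvSp ('/' :: rest) = [] :: pvSp rest by simp [pvSp]]
        exact hR.symm
    · have hstep : pvSp (c :: rest) = (c :: h0) :: t0 := by
        simp [pvSp, hc, he, List.modifyHead]
      have hst : (PySem.Chars.startswith (c :: h0) ['_'] || PySem.Chars.startswith (c :: h0) ['.'])
          = (c == '_' || c == '.') := by
        simp [PySem.Chars.startswith, List.isPrefixOf, BEq.comm]
      have hmark : pvMark (c :: h0)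
          = (if (c == '_' || c == '.') = true then ['x'] else []) ++ c :: h0 := by
        rw [pvMark, hst]; split <;> simp
      have hcf : (c == '/') = false := by simp [hc]
      constructor
      · rw [show pvRegexSub true (c :: rest)
            = (if (c == '_' || c == '.') = true then ['x'] else []) ++ c :: pvRegexSub false rest by
            rw [pvRegexSub, hcf]; split <;> simp_all,
          hstep, List.map_cons, hmark, ih2, he]
        cases t0 with
        | nil => simp [PySem.Chars.join_singleton]
        | cons q t => rw [List.map_cons, PySem.Chars.join_cons_cons]
                      simp [PySem.Chars.join_cons_cons]
      · rw [show pvRegexSub false (c :: rest) = c :: pvRegexSub false rest by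
            rw [pvRegexSub]; simp [hcf],
          hstep, ih2, he]
        cases t0 with
        | nil => simp [PySem.Chars.join_singleton]
        | cons q t => simp [PySem.Chars.join_cons_cons]

-- A's foldl with if/else-append is the map of pvMark
theorem pvFold_eq (segs : List (List Char)) :
    segs.foldl
      (fun parts part =>
        if PySem.Chars.startswith part ['_'] || PySem.Chars.startswith part ['.']
        then parts ++ [['x'] ++ part]
        else parts ++ [part]) []
      = segs.map pvMark := by
  have hfun : (fun (parts : List (List Char)) part =>
      if PySem.Chars.startswith part ['_'] || PySem.Chars.startswith part ['.']
      then parts ++ [['x'] ++ part]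
      else parts ++ [part])
      = (fun parts part => parts ++ [pvMark part]) := by
    funext parts part; simp only [pvMark]; split <;> rfl
  rw [hfun, PySem.List.foldl_append_singleton_eq_map]
  simp

-- ===== VERDICT (by name: the statement is the Claim_ definition above) =====
theorem clean_hadoop_path_spec : Claim_equal_clean_hadoop_path := by
  intro path _
  unfold Spec_clean_hadoop_path clean_hadoop_path clean_hadoop_path_alt
  rw [pvFold_eq, pvSplitOn_eq, (pvMain path.toList).1]
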